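-- pv_equiv track=rewrite | github.com/oaklandmurphy/TheLittleCorporal | general_services/order_formatter.py | get_unit_attribute_label
-- ===== SOURCE A (Python) =====
-- def get_unit_attribute_label(value: int, table_name: str) -> str:
--     """Get descriptive label for a unit attribute.
--
--     Args:
--         value: Numeric value of the attribute
--         table_name: Type of attribute ('quality' or 'morale')
--
--     Returns:
--         Descriptive label string
--     """
--     quality_labels = {1: "green", 2: "regular", 3: "seasoned", 4: "veteran", 5: "elite"}
--     morale_labels = {
--         range(0, 2): "broken",
--         range(2, 4): "shaken",
--         range(4, 7): "steady",
--         range(7, 9): "eager",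
--         range(9, 11): "fresh"
--     }
--
--     table = None
--     if table_name == 'quality':
--         table = quality_labels
--     elif table_name == 'morale':
--         table = morale_labels
--
--     if table:
--         for key, label in table.items():
--             if isinstance(key, range) and value in key:
--                 return label
--             elif value == key:
--                 return label
--     return "unknown"
-- ===== SOURCE B (Python) =====
-- def get_unit_attribute_label(value: int, table_name: str) -> str:
--     """Get descriptive label for a unit attribute (flat lookup tables)."""
--     tables = {
--         'quality': {1: "green", 2: "regular", 3: "seasoned", 4: "veteran", 5: "elite"},
--         'morale': {0: "broken", 1: "broken", 2: "shaken", 3: "shaken",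
--                    4: "steady", 5: "steady", 6: "steady",
--                    7: "eager", 8: "eager", 9: "fresh", 10: "fresh"},
--     }
--     table = tables.get(table_name)
--     if table is None:
--         return "unknown"
--     return table.get(value, "unknown")
-- ===== Notes on version B (the rewrite author's own statement) =====
-- stated objective: simpler
-- what changed: Replaces the scan over a mixed range/int-keyed dict with isinstance branching by two flat int-keyed dicts (morale pre-flattened to one entry per integer 0..10) dispatched through a table-of-tables, so the answer is a single dict lookup with no loop.
import Mathlib
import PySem

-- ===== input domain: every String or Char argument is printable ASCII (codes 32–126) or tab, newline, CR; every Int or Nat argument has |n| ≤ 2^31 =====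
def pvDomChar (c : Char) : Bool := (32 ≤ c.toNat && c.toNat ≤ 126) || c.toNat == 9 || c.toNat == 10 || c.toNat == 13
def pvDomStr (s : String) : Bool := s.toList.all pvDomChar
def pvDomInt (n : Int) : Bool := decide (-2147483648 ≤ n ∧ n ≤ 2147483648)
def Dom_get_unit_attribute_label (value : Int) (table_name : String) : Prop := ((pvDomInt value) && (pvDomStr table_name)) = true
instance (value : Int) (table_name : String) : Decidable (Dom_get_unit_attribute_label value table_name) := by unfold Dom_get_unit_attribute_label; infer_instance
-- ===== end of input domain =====

-- B replaces A's scan over a mixed int/range-keyed dict with flat int-keyed lookup tables (objective: simpler).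


-- ===== PORT A =====
-- Dict keys in A are ints or range objects; model them with a sum-type key.
inductive PKey where
  | i : Int → PKey
  | rng : Int → Int → PKey
deriving DecidableEq, Repr

def aQualityItems : List (PKey × String) :=
  [(.i 1, "green"), (.i 2, "regular"), (.i 3, "seasoned"), (.i 4, "veteran"), (.i 5, "elite")]

def aMoraleItems : List (PKey × String) :=
  [(.rng 0 2, "broken"), (.rng 2 4, "shaken"), (.rng 4 7, "steady"),
   (.rng 7 9, "eager"), (.rng 9 11, "fresh")]

-- A's for-loop over table.items(): 'value in key' for a range key; 'value == key'
-- is False when key is a range object, so only the int case can match there.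
def aScan (value : Int) : List (PKey × String) → String
  | [] => "unknown"
  | (k, label) :: rest =>
    match k with
    | .rng a b => if a ≤ value ∧ value < b then label else aScan value rest
    | .i n => if value = n then label else aScan value rest

def get_unit_attribute_label (value : Int) (table_name : String) : String :=
  if table_name = "quality" then aScan value aQualityItems
  else if table_name = "morale" then aScan value aMoraleItems
  else "unknown"

-- ===== PORT B =====
def bTables : PySem.Dict String (PySem.Dict Int String) :=
  PySem.Dict.ofList
    [("quality", PySem.Dict.ofList
        [(1, "green"), (2, "regular"), (3, "seasoned"), (4, "veteran"), (5, "elite")]),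
     ("morale", PySem.Dict.ofList
        [(0, "broken"), (1, "broken"), (2, "shaken"), (3, "shaken"),
         (4, "steady"), (5, "steady"), (6, "steady"),
         (7, "eager"), (8, "eager"), (9, "fresh"), (10, "fresh")])]

def get_unit_attribute_label_alt (value : Int) (table_name : String) : String :=
  match PySem.Dict.get? bTables table_name with
  | none => "unknown"
  | some table => PySem.Dict.getD table value "unknown"

-- ===== PRECONDITION & SPEC =====
def Spec_get_unit_attribute_label (value : Int) (table_name : String) (out : String) : Prop := out = get_unit_attribute_label_alt value table_name
instance (value : Int) (table_name : String) (out : String) : Decidable (Spec_get_unit_attribute_label value table_name out) := by unfold Spec_get_unit_attribute_label; infer_instance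

-- ===== CLAIM (what is proved, stated in full; the proofs are below) =====
def Claim_equal_get_unit_attribute_label : Prop := ∀ (value : Int) (table_name : String), Dom_get_unit_attribute_label value table_name → Spec_get_unit_attribute_label value table_name (get_unit_attribute_label value table_name)

-- ===== LEMMAS AND PROOFS =====

-- ===== VERDICT (by name: the statement is the Claim_ definition above) =====
theorem get_unit_attribute_label_spec : Claim_equal_get_unit_attribute_label := by
  intro value table_name _
  unfold Spec_get_unit_attribute_label get_unit_attribute_label get_unit_attribute_label_alt
  by_cases hq : table_name = "quality"
  · subst hq
    have ht : PySem.Dict.get? bTables "quality" = some (PySem.Dict.mk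
        [(1, "green"), (2, "regular"), (3, "seasoned"), (4, "veteran"), (5, "elite")]) := by
      decide
    simp only [ht, aScan, aQualityItems, if_true]
    by_cases hlo : 1 ≤ value
    · by_cases hhi : value ≤ 5
      · interval_cases value <;> decide
      · simp only [PySem.Dict.getD, PySem.Dict.get?_mk_cons, beq_iff_eq]
        rw [show (PySem.Dict.mk ([] : List (Int × String))).get? value = none from rfl]
        repeat rw [if_neg (by omega)]
        rfl
    · simp only [PySem.Dict.getD, PySem.Dict.get?_mk_cons, beq_iff_eq]
      rw [show (PySem.Dict.mk ([] : List (Int × String))).get? value = none from rfl]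
      repeat rw [if_neg (by omega)]
      rfl
  · by_cases hm : table_name = "morale"
    · subst hm
      have ht : PySem.Dict.get? bTables "morale" = some (PySem.Dict.mk
          [(0, "broken"), (1, "broken"), (2, "shaken"), (3, "shaken"),
           (4, "steady"), (5, "steady"), (6, "steady"),
           (7, "eager"), (8, "eager"), (9, "fresh"), (10, "fresh")]) := by
        decide
      simp only [if_neg hq, ht, aScan, aMoraleItems, if_true]
      by_cases hlo : 0 ≤ value
      · by_cases hhi : value ≤ 10
        · interval_cases value <;> decide
        · simp only [PySem.Dict.getD, PySem.Dict.get?_mk_cons, beq_iff_eq]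
          rw [show (PySem.Dict.mk ([] : List (Int × String))).get? value = none from rfl]
          repeat rw [if_neg (by omega)]
          rfl
      · simp only [PySem.Dict.getD, PySem.Dict.get?_mk_cons, beq_iff_eq]
        rw [show (PySem.Dict.mk ([] : List (Int × String))).get? value = none from rfl]
        repeat rw [if_neg (by omega)]
        rfl
    · have h1 : ("quality" == table_name) = false := by
        simp only [beq_eq_false_iff_ne]; exact Ne.symm hq
      have h2 : ("morale" == table_name) = false := by
        simp only [beq_eq_false_iff_ne]; exact Ne.symm hm
      have ht : PySem.Dict.get? bTables table_name = none := by
        simp [bTables, PySem.Dict.ofList, PySem.Dict.get?, PySem.Dict.update,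
          PySem.Dict.empty, PySem.Dict.insert, PySem.Dict.contains, List.find?,
          List.foldl, h1, h2]
      simp [hq, hm, ht]
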